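-- pv_equiv track=rewrite | github.com/Ziyueeeeee/Chinese-Fortune-Telling- | Project DH version /my_module/Get_Natal_Chart.py | gene_year_column
-- ===== SOURCE A (Python) =====
-- def gene_year_column(birth):
--     """
--     Generate the Tiangan and Dizhi for the year column based on the given birth year.
--
--     Parameters:
--     - birth (list): A list representing a birth date in the format [year, month, day, hour].
--
--     Returns:
--     list: A list containing the Tiangan and Dizhi for the year column.
--     """
--     # Define lists for Tiangan and Dizhi
--     tiangan_1 = ['庚','辛','壬','癸','甲','乙','丙','丁','戊','己']
--     dizhi_1 = ["子","丑","寅","卯","辰","巳","午","未","申","酉","戌","亥"]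
--     # Initialize counters
--     a,b = 0,0
--     # Extract the birth year from the input
--     year = birth[0]
--     # Normalize the year to a 60-year cycle starting from 1900
--     year -= 1900
--     year %= 60
--     # Calculate Tiangan and Dizhi for the given year
--     for _ in range(year):
--         a += 1
--         b += 1
--     year_gx = a % 10
--     year_zx = b % 12
--     year_gan = tiangan_1[year_gx]
--     year_zhi = dizhi_1[year_zx]
--     # Return a list containing the Tiangan and Dizhi for the year column
--     return [year_gan ,year_zhi]
-- ===== SOURCE B (Python) =====
-- def gene_year_column(birth):
--     """Precompute the full 60-entry sexagenary cycle table by stepping two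
--     cyclic counters, then answer with a single table lookup."""
--     tiangan_1 = ['庚','辛','壬','癸','甲','乙','丙','丁','戊','己']
--     dizhi_1 = ["子","丑","寅","卯","辰","巳","午","未","申","酉","戌","亥"]
--     cycle = []
--     g, z = 0, 0
--     for _ in range(60):
--         cycle.append([tiangan_1[g], dizhi_1[z]])
--         g = g + 1 if g < 9 else 0
--         z = z + 1 if z < 11 else 0
--     return cycle[(birth[0] - 1900) % 60]
-- ===== Notes on version B (the rewrite author's own statement) =====
-- stated objective: alternative
-- what changed: B builds the full 60-entry sexagenary cycle table once by stepping two cyclic counters (no per-year counting loop and no modular index computation into the stem/branch lists), then returns a single table lookup at (year-1900)%60.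
import Mathlib
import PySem

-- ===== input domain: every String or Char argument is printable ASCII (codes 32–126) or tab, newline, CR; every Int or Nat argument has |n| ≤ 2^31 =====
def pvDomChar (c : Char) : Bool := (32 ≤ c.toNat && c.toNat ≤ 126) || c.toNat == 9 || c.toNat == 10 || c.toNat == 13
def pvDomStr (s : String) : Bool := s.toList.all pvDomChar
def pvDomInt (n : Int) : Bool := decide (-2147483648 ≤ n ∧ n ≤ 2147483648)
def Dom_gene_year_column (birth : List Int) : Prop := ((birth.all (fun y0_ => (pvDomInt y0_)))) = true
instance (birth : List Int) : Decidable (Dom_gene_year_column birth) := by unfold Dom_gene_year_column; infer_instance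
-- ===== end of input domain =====

-- B builds the whole 60-entry sexagenary table by cyclic stepping and does one lookup; return value only.

-- ===== PORT A =====
def gene_year_column (birth : List Int) : List String :=
  let tiangan_1 : List String := ["庚","辛","壬","癸","甲","乙","丙","丁","戊","己"]
  let dizhi_1 : List String := ["子","丑","寅","卯","辰","巳","午","未","申","酉","戌","亥"]
  match PySem.List.pyGet? birth 0 with
  | none => []   -- IndexError; excluded by Pre_
  | some y0 =>
    let year := PySem.Int.mod (y0 - 1900) 60
    let ab := (PySem.List.pyRange 0 year 1).foldl
      (fun (p : Int × Int) _ => (p.1 + 1, p.2 + 1)) (0, 0)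
    let year_gx := PySem.Int.mod ab.1 10
    let year_zx := PySem.Int.mod ab.2 12
    [(PySem.List.pyGet? tiangan_1 year_gx).getD "",
     (PySem.List.pyGet? dizhi_1 year_zx).getD ""]

-- ===== PORT B =====
def gene_year_column_alt (birth : List Int) : List String :=
  let tiangan_1 : List String := ["庚","辛","壬","癸","甲","乙","丙","丁","戊","己"]
  let dizhi_1 : List String := ["子","丑","寅","卯","辰","巳","午","未","申","酉","戌","亥"]
  let st := (PySem.List.pyRange 0 60 1).foldl
    (fun (s : List (List String) × Int × Int) _ =>
      let cyc := s.1 ++ [[(PySem.List.pyGet? tiangan_1 s.2.1).getD "",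
                          (PySem.List.pyGet? dizhi_1 s.2.2).getD ""]]
      let g := if s.2.1 < 9 then s.2.1 + 1 else 0
      let z := if s.2.2 < 11 then s.2.2 + 1 else 0
      (cyc, g, z)) ([], 0, 0)
  match PySem.List.pyGet? birth 0 with
  | none => []   -- IndexError; excluded by Pre_
  | some y0 =>
    (PySem.List.pyGet? st.1 (PySem.Int.mod (y0 - 1900) 60)).getD []

-- ===== PRECONDITION & SPEC =====
-- A raises IndexError on birth = []; Pre_ excludes exactly that.
def Pre_gene_year_column (birth : List Int) : Prop := birth ≠ []
instance (birth : List Int) : Decidable (Pre_gene_year_column birth) := by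
  unfold Pre_gene_year_column; infer_instance
def pvWitness_gene_year_column : List Int := [1995, 3, 14, 8]

def Spec_gene_year_column (birth : List Int) (out : List String) : Prop := out = gene_year_column_alt birth
instance (birth : List Int) (out : List String) : Decidable (Spec_gene_year_column birth out) := by unfold Spec_gene_year_column; infer_instance

-- ===== CLAIM (what is proved, stated in full; the proofs are below) =====
def Claim_equal_gene_year_column : Prop := ∀ (birth : List Int), Dom_gene_year_column birth → Pre_gene_year_column birth → Spec_gene_year_column birth (gene_year_column birth)

-- ===== LEMMAS AND PROOFS =====

-- Both results depend on the input only through r = (year-1900) mod 60; for every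
-- residue 0 ≤ r < 60 the two bodies agree (checked by evaluation).
theorem pv_residue_eq (r : Int) (h0 : 0 ≤ r) (h1 : r < 60) :
    (let tiangan_1 : List String := ["庚","辛","壬","癸","甲","乙","丙","丁","戊","己"]
     let dizhi_1 : List String := ["子","丑","寅","卯","辰","巳","午","未","申","酉","戌","亥"]
     let ab := (PySem.List.pyRange 0 r 1).foldl
       (fun (p : Int × Int) _ => (p.1 + 1, p.2 + 1)) (0, 0)
     [(PySem.List.pyGet? tiangan_1 (PySem.Int.mod ab.1 10)).getD "",
      (PySem.List.pyGet? dizhi_1 (PySem.Int.mod ab.2 12)).getD ""])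
    =
    (let tiangan_1 : List String := ["庚","辛","壬","癸","甲","乙","丙","丁","戊","己"]
     let dizhi_1 : List String := ["子","丑","寅","卯","辰","巳","午","未","申","酉","戌","亥"]
     let st := (PySem.List.pyRange 0 60 1).foldl
       (fun (s : List (List String) × Int × Int) _ =>
         let cyc := s.1 ++ [[(PySem.List.pyGet? tiangan_1 s.2.1).getD "",
                             (PySem.List.pyGet? dizhi_1 s.2.2).getD ""]]
         let g := if s.2.1 < 9 then s.2.1 + 1 else 0
         let z := if s.2.2 < 11 then s.2.2 + 1 else 0
         (cyc, g, z)) ([], 0, 0)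
     (PySem.List.pyGet? st.1 r).getD []) := by
  interval_cases r <;> decide

-- ===== VERDICT (by name: the statement is the Claim_ definition above) =====
theorem gene_year_column_spec : Claim_equal_gene_year_column := by
  intro birth _ hpre
  cases birth with
  | nil => exact absurd rfl hpre
  | cons y0 rest =>
    unfold Spec_gene_year_column gene_year_column gene_year_column_alt
    have h0 : PySem.List.pyGet? (y0 :: rest) 0 = some y0 := by
      simp [PySem.List.pyGet?, PySem.List.pyIdx?]
    simp only [h0]
    exact pv_residue_eq (PySem.Int.mod (y0 - 1900) 60)
      (PySem.Int.mod_nonneg (a := y0 - 1900) (b := 60) (by norm_num))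
      (PySem.Int.mod_lt (a := y0 - 1900) (b := 60) (by norm_num))
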